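-- pv_equiv track=rewrite | github.com/xl666/recursosEstructuras24 | parcial1/estudiantes/josue/cuantos_puntos.py | puntos_continuos
-- ===== SOURCE A (Python) =====
-- def puntos_continuos(cadena):
--     contador = 0
--     punto_anterior = False
--
--     for caracter in cadena:
--         if caracter == '.':
--             if not punto_anterior:
--                 contador += 1
--             punto_anterior = True
--         else:
--             punto_anterior = False
--
--     return contador
-- ===== SOURCE B (Python) =====
-- def puntos_continuos(cadena):
--     dots = sum(1 for c in cadena if c == '.')
--     pairs = sum(1 for a, b in zip(cadena, cadena[1:]) if a == '.' and b == '.')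
--     return dots - pairs
-- ===== Notes on version B (the rewrite author's own statement) =====
-- stated objective: alternative
-- what changed: Replaces the one-pass previous-dot state machine with an arithmetic identity: the number of maximal dot runs equals the total count of dots minus the count of adjacent dot pairs, computed by two independent counting passes (one over the string, one over it zipped with its own tail).
import Mathlib
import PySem

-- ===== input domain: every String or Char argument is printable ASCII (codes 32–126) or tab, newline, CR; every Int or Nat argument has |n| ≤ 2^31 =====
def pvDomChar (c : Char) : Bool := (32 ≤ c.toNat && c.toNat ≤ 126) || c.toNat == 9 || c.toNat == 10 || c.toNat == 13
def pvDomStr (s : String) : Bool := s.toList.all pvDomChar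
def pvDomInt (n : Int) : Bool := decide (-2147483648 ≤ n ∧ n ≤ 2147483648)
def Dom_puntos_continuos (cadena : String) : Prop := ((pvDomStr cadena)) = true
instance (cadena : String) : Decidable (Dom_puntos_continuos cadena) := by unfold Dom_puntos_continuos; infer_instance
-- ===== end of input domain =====

-- B replaces A's previous-dot state machine with the arithmetic identity: #runs of dots = #dots − #adjacent dot pairs (alternative decomposition, same O(n) cost).
-- ===== PORT A =====
-- A's for-loop over the characters with state (contador, punto_anterior)
def pvLoopA : List Char → Int → Bool → Int
  | [], contador, _ => contador
  | c :: t, contador, punto_anterior =>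
    if c = '.' then
      pvLoopA t (if punto_anterior then contador else contador + 1) true
    else
      pvLoopA t contador false

def puntos_continuos (cadena : String) : Int := pvLoopA cadena.toList 0 false

-- ===== PORT B =====
-- dots = count of '.' characters; pairs = count of adjacent ('.','.') pairs in zip(cadena, cadena[1:]); result = dots - pairs
def puntos_continuos_alt (cadena : String) : Int :=
  let l := cadena.toList
  let dots : Int := l.countP (· == '.')
  let pairs : Int := (l.zip l.tail).countP (fun p => p.1 == '.' && p.2 == '.')
  dots - pairs

-- ===== PRECONDITION & SPEC =====
def Spec_puntos_continuos (cadena : String) (out : Int) : Prop := out = puntos_continuos_alt cadena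
instance (cadena : String) (out : Int) : Decidable (Spec_puntos_continuos cadena out) := by unfold Spec_puntos_continuos; infer_instance

-- ===== CLAIM =====
def Claim_equal_puntos_continuos : Prop := ∀ (cadena : String), Dom_puntos_continuos cadena → Spec_puntos_continuos cadena (puntos_continuos cadena)

-- ===== LEMMAS AND PROOFS =====

-- boundary-aware adjacent-dot-pair count: prev says whether the previous character was '.'
def pvPairsAux (prev : Bool) : List Char → Int
  | [] => 0
  | c :: t => (if prev = true ∧ c = '.' then 1 else 0) + pvPairsAux (c == '.') t

theorem pvPairsAux_eq (l : List Char) : ∀ (b : Bool),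
    pvPairsAux b l = (if b = true ∧ l.head? = some '.' then 1 else 0)
      + ((l.zip l.tail).countP (fun p => p.1 == '.' && p.2 == '.') : Int) := by
  induction l with
  | nil => intro b; simp [pvPairsAux]
  | cons c t ih =>
    intro b
    rw [pvPairsAux, ih]
    cases t with
    | nil => simp
    | cons d t' =>
      simp only [List.tail_cons, List.zip_cons_cons, List.countP_cons, List.head?_cons]
      by_cases hc : c = '.' <;> by_cases hd : d = '.' <;>
        simp [hc, hd] <;> ring

-- A's loop computes: accumulator + dots remaining − boundary-aware pair count
theorem pvMain (l : List Char) : ∀ (n : Int) (prev : Bool),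
    pvLoopA l n prev = n + (l.countP (· == '.') : Int) - pvPairsAux prev l := by
  induction l with
  | nil => intro n prev; simp [pvLoopA, pvPairsAux]
  | cons c t ih =>
    intro n prev
    by_cases hc : c = '.'
    · subst hc
      cases prev <;>
        · rw [pvLoopA]
          simp only [pvPairsAux, List.countP_cons, ih]
          simp
          ring
    · rw [pvLoopA, if_neg hc, pvPairsAux, ih]
      have : (c == '.') = false := by simp [hc]
      simp [this, hc]

-- ===== VERDICT =====
theorem puntos_continuos_spec : Claim_equal_puntos_continuos := by
  intro cadena _
  unfold Spec_puntos_continuos puntos_continuos puntos_continuos_alt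
  rw [pvMain]
  rw [pvPairsAux_eq]
  simp
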